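-- pv_equiv track=rewrite | github.com/Pravargolecha2011229/PPE-detection-model | PPE_detection_app.py | analyze_compliance
-- ===== SOURCE A (Python) =====
-- def analyze_compliance(detections):
--     ppe_status = {
--         'Hardhat': False,
--         'Mask': False,
--         'Safety Vest': False
--     }
--
--     for det in detections:
--         if det['class'] in ppe_status:
--             ppe_status[det['class']] = True
--
--     items_present = sum(ppe_status.values())
--
--     if items_present == 3:
--         return "🟩 Compliant", "compliant"
--     elif items_present > 0:
--         return "🟨 Partially Compliant", "partial"
--     else:
--         return "🟥 Non-Compliant", "non-compliant"
-- ===== SOURCE B (Python) =====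
-- def analyze_compliance(detections):
--     def found(item):
--         return any(d['class'] == item for d in detections)
--
--     required = ('Hardhat', 'Mask', 'Safety Vest')
--     if all(found(item) for item in required):
--         return "🟩 Compliant", "compliant"
--     if any(found(item) for item in required):
--         return "🟨 Partially Compliant", "partial"
--     return "🟥 Non-Compliant", "non-compliant"
-- ===== Notes on version B (the rewrite author's own statement) =====
-- stated objective: idiomatic
-- what changed: A makes one pass over detections mutating a dict of three boolean flags and branches on the numeric sum of its values; B keeps no mutable state at all: it asks, per required item, whether any detection matches it (a short-circuiting scan per item), and branches with all()/any() boolean logic instead of a count.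
import Mathlib
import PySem

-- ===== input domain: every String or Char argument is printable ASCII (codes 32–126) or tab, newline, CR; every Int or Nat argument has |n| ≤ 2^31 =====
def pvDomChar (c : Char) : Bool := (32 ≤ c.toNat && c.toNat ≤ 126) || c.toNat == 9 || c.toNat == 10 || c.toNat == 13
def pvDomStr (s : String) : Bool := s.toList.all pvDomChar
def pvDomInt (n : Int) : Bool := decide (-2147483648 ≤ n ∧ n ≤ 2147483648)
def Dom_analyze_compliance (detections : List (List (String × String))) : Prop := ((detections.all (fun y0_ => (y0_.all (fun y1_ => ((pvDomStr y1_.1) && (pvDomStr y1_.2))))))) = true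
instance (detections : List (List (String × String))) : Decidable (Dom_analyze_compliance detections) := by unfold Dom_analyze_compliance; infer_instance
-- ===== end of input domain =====

-- B replaces A's mutated flag-dict and numeric count by per-item any-scans combined with all/any boolean logic (idiomatic; same cost).


-- ===== PORT A =====
def analyze_compliance (detections : List (List (String × String))) : String × String :=
  let ppe_status : PySem.Dict String Bool :=
    PySem.Dict.ofList [("Hardhat", false), ("Mask", false), ("Safety Vest", false)]
  let ppe_status := detections.foldl (fun st det =>
    -- det['class'] raises KeyError when 'class' is absent (none here); excluded by Pre_
    match (PySem.Dict.mk det).get? "class" with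
    | some c => if st.contains c then st.insert c true else st
    | none => st) ppe_status
  let items_present : Int := (ppe_status.values.map (fun b => if b then (1:Int) else 0)).sum
  if items_present = 3 then ("🟩 Compliant", "compliant")
  else if items_present > 0 then ("🟨 Partially Compliant", "partial")
  else ("🟥 Non-Compliant", "non-compliant")

-- ===== PORT B =====
def analyze_compliance_alt (detections : List (List (String × String))) : String × String :=
  -- found item = any(d['class'] == item for d in detections); d['class'] raises KeyError
  -- when 'class' is absent (none here, treated as no match); such inputs are excluded by Pre_
  let found : String → Bool := fun item =>
    detections.any (fun det =>
      match (PySem.Dict.mk det).get? "class" with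
      | some c => c == item
      | none => false)
  if ["Hardhat", "Mask", "Safety Vest"].all found then ("🟩 Compliant", "compliant")
  else if ["Hardhat", "Mask", "Safety Vest"].any found then ("🟨 Partially Compliant", "partial")
  else ("🟥 Non-Compliant", "non-compliant")

-- ===== PRECONDITION & SPEC =====
-- Pre_ excludes exactly the detections lacking a 'class' key, on which both Pythons raise KeyError.
def Pre_analyze_compliance (detections : List (List (String × String))) : Prop :=
  detections.all (fun det => ((PySem.Dict.mk det).get? "class").isSome) = true
instance (detections : List (List (String × String))) : Decidable (Pre_analyze_compliance detections) := by unfold Pre_analyze_compliance; infer_instance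
def pvWitness_analyze_compliance : (List (List (String × String))) := [[("class", "Hardhat")], [("class", "Person")]]

def Spec_analyze_compliance (detections : List (List (String × String))) (out : String × String) : Prop := out = analyze_compliance_alt detections
instance (detections : List (List (String × String))) (out : String × String) : Decidable (Spec_analyze_compliance detections out) := by unfold Spec_analyze_compliance; infer_instance

-- ===== CLAIM (what is proved, stated in full; the proofs are below) =====
def Claim_equal_analyze_compliance : Prop := ∀ (detections : List (List (String × String))), Dom_analyze_compliance detections → Pre_analyze_compliance detections → Spec_analyze_compliance detections (analyze_compliance detections)

-- ===== LEMMAS AND PROOFS =====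

/-- A's loop body. -/
def stepA (st : PySem.Dict String Bool) (det : List (String × String)) : PySem.Dict String Bool :=
  match (PySem.Dict.mk det).get? "class" with
  | some c => if st.contains c then st.insert c true else st
  | none => st

lemma foldA_keys (dets : List (List (String × String))) (d : PySem.Dict String Bool) :
    (dets.foldl stepA d).keys = d.keys := by
  induction dets generalizing d with
  | nil => rfl
  | cons det dets ih =>
    simp only [List.foldl_cons]
    rw [ih]
    unfold stepA
    cases h : (PySem.Dict.mk det).get? "class" with
    | none => rfl
    | some c =>
      by_cases hc : d.contains c = true
      · simp [hc, PySem.Dict.keys_insert_of_contains]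
      · simp [hc]

lemma foldA_getD (dets : List (List (String × String))) (d : PySem.Dict String Bool) (k : String) :
    (dets.foldl stepA d).getD k false
      = (d.getD k false ||
         (d.contains k && dets.any (fun det => (PySem.Dict.mk det).get? "class" == some k))) := by
  induction dets generalizing d with
  | nil => simp
  | cons det dets ih =>
    simp only [List.foldl_cons, List.any_cons]
    rw [ih]
    unfold stepA
    cases h : (PySem.Dict.mk det).get? "class" with
    | none => simp
    | some c =>
      by_cases hc : d.contains c = true
      · simp only [hc, if_true]
        by_cases hk : k = c
        · subst hk
          simp [PySem.Dict.getD_insert_self, PySem.Dict.contains_insert_self, hc]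
        · rw [PySem.Dict.getD_insert_of_ne d true false hk,
              PySem.Dict.contains_insert]
          have : ((some c : Option String) == some k) = false := by
            simp [Ne.symm hk]
          simp [this, show (k == c) = false from by simp [hk]]
      · simp only [hc, if_false, Bool.false_eq_true]
        by_cases hk : k = c
        · subst hk
          simp [hc]
        · have : ((some c : Option String) == some k) = false := by
            simp [Ne.symm hk]
          simp [this]

/-- B's per-detection match test equals the beq form used on A's side. -/
lemma match_eq_beq (dets : List (List (String × String))) (k : String) :
    (dets.any (fun det =>
      match (PySem.Dict.mk det).get? "class" with
      | some c => c == k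
      | none => false))
      = dets.any (fun det => (PySem.Dict.mk det).get? "class" == some k) := by
  induction dets with
  | nil => rfl
  | cons det dets ih =>
    simp only [List.any_cons, ih]
    cases h : (PySem.Dict.mk det).get? "class" with
    | none => simp
    | some c => simp

-- ===== VERDICT (by name: the statement is the Claim_ definition above) =====
theorem analyze_compliance_spec : Claim_equal_analyze_compliance := by
  intro dets _ _
  unfold Spec_analyze_compliance analyze_compliance analyze_compliance_alt
  simp only []
  have hkeys : (dets.foldl stepA (PySem.Dict.ofList
      [("Hardhat", false), ("Mask", false), ("Safety Vest", false)])).keys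
      = ["Hardhat", "Mask", "Safety Vest"] := by
    rw [foldA_keys]; rfl
  have hnd : (dets.foldl stepA (PySem.Dict.ofList
      [("Hardhat", false), ("Mask", false), ("Safety Vest", false)])).keys.Nodup := by
    rw [hkeys]; decide
  rw [show (fun (st : PySem.Dict String Bool) (det : List (String × String)) =>
        match (PySem.Dict.mk det).get? "class" with
        | some c => if st.contains c then st.insert c true else st
        | none => st) = stepA from rfl]
  rw [PySem.Dict.values_eq_map_keys _ hnd false, hkeys]
  simp only [List.map_cons, List.map_nil, foldA_getD, List.all_cons, List.all_nil,
    List.any_cons, List.any_nil, match_eq_beq]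
  simp only [
    show (PySem.Dict.ofList [("Hardhat", false), ("Mask", false), ("Safety Vest", false)]
      : PySem.Dict String Bool).getD "Hardhat" false = false from rfl,
    show (PySem.Dict.ofList [("Hardhat", false), ("Mask", false), ("Safety Vest", false)]
      : PySem.Dict String Bool).getD "Mask" false = false from rfl,
    show (PySem.Dict.ofList [("Hardhat", false), ("Mask", false), ("Safety Vest", false)]
      : PySem.Dict String Bool).getD "Safety Vest" false = false from rfl,
    show (PySem.Dict.ofList [("Hardhat", false), ("Mask", false), ("Safety Vest", false)]
      : PySem.Dict String Bool).contains "Hardhat" = true from rfl,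
    show (PySem.Dict.ofList [("Hardhat", false), ("Mask", false), ("Safety Vest", false)]
      : PySem.Dict String Bool).contains "Mask" = true from rfl,
    show (PySem.Dict.ofList [("Hardhat", false), ("Mask", false), ("Safety Vest", false)]
      : PySem.Dict String Bool).contains "Safety Vest" = true from rfl,
    Bool.false_or, Bool.true_and]
  set h := dets.any (fun det => (PySem.Dict.mk det).get? "class" == some "Hardhat")
  set m := dets.any (fun det => (PySem.Dict.mk det).get? "class" == some "Mask")
  set v := dets.any (fun det => (PySem.Dict.mk det).get? "class" == some "Safety Vest")
  cases h <;> cases m <;> cases v <;> simp
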